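-- pv_equiv track=rewrite | github.com/toro68/kampplanlegging | app.py | generer_perioder
-- ===== SOURCE A (Python) =====
-- def generer_perioder(total_tid):
--     """Genererer bytteperioder basert på total kamptid"""
--     perioder = []
--     omgang_tid = total_tid // 2
--
--     # Første omgang
--     tid = 0
--     perioder.append(f'0-15')  # Første periode er alltid 15 min
--     tid += 15
--     while tid < omgang_tid:
--         neste_tid = min(tid + 10, omgang_tid)
--         perioder.append(f'{tid}-{neste_tid}')
--         tid = neste_tid
--
--     # Andre omgang
--     tid = omgang_tid
--     while tid < total_tid:
--         neste_tid = min(tid + 10, total_tid)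
--         perioder.append(f'{tid}-{neste_tid}')
--         tid = neste_tid
--
--     return perioder
-- ===== SOURCE B (Python) =====
-- def generer_perioder(total_tid):
--     """Genererer bytteperioder basert på total kamptid"""
--     omgang_tid = total_tid // 2
--     # cut points of each half; pairwise formatting gives the period strings
--     cuts1 = [0, 15] + list(range(25, omgang_tid, 10)) + ([omgang_tid] if omgang_tid > 15 else [])
--     cuts2 = list(range(omgang_tid, total_tid, 10)) + ([total_tid] if total_tid > omgang_tid else [])
--     fmt = lambda cs: [f'{a}-{b}' for a, b in zip(cs, cs[1:])]
--     return fmt(cuts1) + fmt(cuts2)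
-- ===== Notes on version B (the rewrite author's own statement) =====
-- stated objective: alternative
-- what changed: B computes the cut-point lists of each half arithmetically (range with step 10 plus capped endpoints) and formats them in one pairwise zip pass, instead of A's two stateful while loops that format as they advance.
import Mathlib
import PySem

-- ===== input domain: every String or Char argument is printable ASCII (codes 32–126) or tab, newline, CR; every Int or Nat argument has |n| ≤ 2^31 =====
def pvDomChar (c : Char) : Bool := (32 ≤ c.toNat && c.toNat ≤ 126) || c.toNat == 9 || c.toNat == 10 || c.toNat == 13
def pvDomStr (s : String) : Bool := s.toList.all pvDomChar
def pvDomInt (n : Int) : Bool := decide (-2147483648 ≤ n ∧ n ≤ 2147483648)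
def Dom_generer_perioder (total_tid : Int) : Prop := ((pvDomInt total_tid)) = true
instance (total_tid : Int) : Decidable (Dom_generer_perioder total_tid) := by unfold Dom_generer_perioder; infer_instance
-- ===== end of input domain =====

-- B replaces A's two stateful while loops by arithmetic cut-point lists and one pairwise zip-format pass (alternative decomposition, same cost).

-- ===== PORT A =====
-- one while loop of A: while tid < bound: neste = min(tid+10, bound); append f'{tid}-{neste}'; tid = neste
def genLoop (bound tid : Int) : List String :=
  if tid < bound then
    let neste := min (tid + 10) bound
    (PySem.Int.toStr tid ++ "-" ++ PySem.Int.toStr neste) :: genLoop bound neste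
  else []
termination_by (bound - tid).toNat
decreasing_by omega

def generer_perioder (total_tid : Int) : List String :=
  let omgang_tid := PySem.Int.floordiv total_tid 2
  ("0-15" :: genLoop omgang_tid 15) ++ genLoop total_tid omgang_tid

-- ===== PORT B =====
-- [f'{a}-{b}' for a, b in zip(cs, cs[1:])]
def pairFmt (cs : List Int) : List String :=
  (cs.zip cs.tail).map fun p => PySem.Int.toStr p.1 ++ "-" ++ PySem.Int.toStr p.2

def generer_perioder_alt (total_tid : Int) : List String :=
  let omgang_tid := PySem.Int.floordiv total_tid 2
  let cuts1 := [0, 15] ++ PySem.List.pyRange 25 omgang_tid 10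
      ++ (if 15 < omgang_tid then [omgang_tid] else [])
  let cuts2 := PySem.List.pyRange omgang_tid total_tid 10
      ++ (if omgang_tid < total_tid then [total_tid] else [])
  pairFmt cuts1 ++ pairFmt cuts2

-- ===== PRECONDITION & SPEC =====
def Spec_generer_perioder (total_tid : Int) (out : List String) : Prop := out = generer_perioder_alt total_tid
instance (total_tid : Int) (out : List String) : Decidable (Spec_generer_perioder total_tid out) := by unfold Spec_generer_perioder; infer_instance

-- ===== CLAIM (what is proved, stated in full; the proofs are below) =====
def Claim_equal_generer_perioder : Prop := ∀ (total_tid : Int), Dom_generer_perioder total_tid → Spec_generer_perioder total_tid (generer_perioder total_tid)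

-- ===== LEMMAS AND PROOFS =====

theorem pyRange10_nil (a b : Int) (h : b ≤ a) : PySem.List.pyRange a b 10 = [] := by
  rw [PySem.List.pyRange_of_pos a b (by norm_num)]
  simp [not_lt.mpr h]

theorem pyRange10_cons (a b : Int) (h : a < b) :
    PySem.List.pyRange a b 10 = a :: PySem.List.pyRange (a + 10) b 10 := by
  rw [PySem.List.pyRange_of_pos a b (by norm_num),
      PySem.List.pyRange_of_pos (a + 10) b (by norm_num)]
  by_cases h2 : a + 10 < b
  · have hn : (if a < b then ((b - a + 10 - 1) / 10).toNat else 0)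
        = (if a + 10 < b then ((b - (a + 10) + 10 - 1) / 10).toNat else 0) + 1 := by
      simp only [if_pos h, if_pos h2]; omega
    rw [hn, List.range_succ_eq_map, List.map_cons, List.map_map]
    refine List.cons_eq_cons.mpr ⟨by push_cast; ring, ?_⟩
    exact List.map_congr_left (fun k _ => by simp [Function.comp]; push_cast; ring)
  · have hn : (if a < b then ((b - a + 10 - 1) / 10).toNat else 0) = 1 := by
      simp only [if_pos h]; omega
    rw [hn]
    simp [not_lt.mpr (not_lt.mp h2), List.range_succ]

theorem genLoop_unfold (bound tid : Int) :
    genLoop bound tid = if tid < bound then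
      (PySem.Int.toStr tid ++ "-" ++ PySem.Int.toStr (min (tid + 10) bound))
        :: genLoop bound (min (tid + 10) bound)
    else [] := by
  rw [genLoop.eq_def]

theorem pairFmt_single (a : Int) : pairFmt [a] = [] := rfl
theorem pairFmt_cons (a b : Int) (l : List Int) :
    pairFmt (a :: b :: l)
      = (PySem.Int.toStr a ++ "-" ++ PySem.Int.toStr b) :: pairFmt (b :: l) := by
  simp [pairFmt]

-- A's while loop produces exactly the pairwise formatting of B's cut list
theorem genLoop_eq_pairFmt (bound tid : Int) :
    genLoop bound tid
      = pairFmt (PySem.List.pyRange tid bound 10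
          ++ (if tid < bound then [bound] else [])) := by
  by_cases h : tid < bound
  · rw [genLoop_unfold, if_pos h, if_pos h, pyRange10_cons tid bound h]
    by_cases h2 : tid + 10 < bound
    · have hmin : min (tid + 10) bound = tid + 10 := by omega
      have ih := genLoop_eq_pairFmt bound (tid + 10)
      rw [if_pos h2] at ih
      rw [pyRange10_cons (tid + 10) bound h2]
      simp only [hmin, List.cons_append, pairFmt_cons]
      rw [ih, pyRange10_cons (tid + 10) bound h2]
      simp only [List.cons_append]
    · have hmin : min (tid + 10) bound = bound := by omega
      have hnil : PySem.List.pyRange (tid + 10) bound 10 = [] :=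
        pyRange10_nil _ _ (not_lt.mp h2)
      rw [hnil]
      simp only [hmin, List.nil_append, List.cons_append, pairFmt_cons, pairFmt_single]
      rw [genLoop_unfold, if_neg (lt_irrefl bound)]
  · rw [genLoop_unfold, if_neg h, if_neg h, pyRange10_nil tid bound (not_lt.mp h)]
    rfl
termination_by (bound - tid).toNat
decreasing_by all_goals omega

-- ===== VERDICT (by name: the statement is the Claim_ definition above) =====
theorem generer_perioder_spec : Claim_equal_generer_perioder := by
  intro total_tid _
  unfold Spec_generer_perioder generer_perioder generer_perioder_alt
  simp only
  set omg := PySem.Int.floordiv total_tid 2 with homg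
  congr 1
  · -- first half: "0-15" :: loop  =  pairFmt cuts1
    rw [genLoop_eq_pairFmt omg 15]
    show _ = pairFmt ((0 : Int) :: (15 : Int) :: (PySem.List.pyRange 25 omg 10
        ++ if 15 < omg then [omg] else []))
    rw [pairFmt_cons]
    congr 1
    by_cases h : (15 : Int) < omg
    · rw [pyRange10_cons 15 omg h, if_pos h]
      simp
    · rw [pyRange10_nil 15 omg (not_lt.mp h), if_neg h,
          pyRange10_nil 25 omg (by omega)]
      rfl
  · exact genLoop_eq_pairFmt total_tid omg
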